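-- pv_equiv track=rewrite | github.com/xlaesch/ClearanceVisualized | src/format.py | trim_blank_edges
-- ===== SOURCE A (Python) =====
-- def trim_blank_edges(lines):
--     start = 0
--     end = len(lines)
--     while start < end and lines[start] == "":
--         start += 1
--     while end > start and lines[end - 1] == "":
--         end -= 1
--     return lines[start:end]
-- ===== SOURCE B (Python) =====
-- def trim_blank_edges(lines):
--     def drop_leading(ls):
--         for i, l in enumerate(ls):
--             if l != "":
--                 return ls[i:]
--         return []
--     return drop_leading(drop_leading(lines)[::-1])[::-1]
-- ===== Notes on version B (the rewrite author's own statement) =====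
-- stated objective: simpler
-- what changed: Replaces the two index-based boundary while-loops and final slice by a 'drop leading empties' helper applied twice around a reversal (strip front, reverse, strip front, reverse).
import Mathlib
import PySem

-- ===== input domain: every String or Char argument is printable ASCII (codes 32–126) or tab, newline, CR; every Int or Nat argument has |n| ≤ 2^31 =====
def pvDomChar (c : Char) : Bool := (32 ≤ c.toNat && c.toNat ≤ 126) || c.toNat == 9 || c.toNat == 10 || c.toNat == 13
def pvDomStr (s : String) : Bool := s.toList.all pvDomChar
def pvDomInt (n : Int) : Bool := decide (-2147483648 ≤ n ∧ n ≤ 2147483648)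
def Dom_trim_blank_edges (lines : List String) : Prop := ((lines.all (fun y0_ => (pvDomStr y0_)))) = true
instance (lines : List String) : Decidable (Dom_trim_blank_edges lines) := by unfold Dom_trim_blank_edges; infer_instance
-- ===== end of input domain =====

-- B replaces A's two index-based boundary while-loops and slice by a
-- strip-leading-empties helper applied twice around a reversal (same cost, simpler shape).

-- ===== PORT A =====
-- first while loop: advance start while lines[start] == ""
def pvTrimStart (lines : List String) (stop : Nat) (start : Nat) : Nat :=
  if h : start < stop ∧ PySem.List.pyGet? lines (start : Int) = some "" then
    pvTrimStart lines stop (start + 1)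
  else start
termination_by stop - start
decreasing_by omega

-- second while loop: retreat end while lines[end-1] == ""
def pvTrimEnd (lines : List String) (start : Nat) (stop : Nat) : Nat :=
  if h : start < stop ∧ PySem.List.pyGet? lines ((stop : Int) - 1) = some "" then
    pvTrimEnd lines start (stop - 1)
  else stop
termination_by stop

def trim_blank_edges (lines : List String) : List String :=
  let start := pvTrimStart lines lines.length 0
  let stop := pvTrimEnd lines start lines.length
  PySem.List.slice lines (some (start : Int)) (some (stop : Int))

-- ===== PORT B =====
-- helper drop_leading: suffix from the first non-empty element (or [])
def pvDropLeading (ls : List String) : List String :=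
  match ls with
  | [] => []
  | l :: rest => if l ≠ "" then l :: rest else pvDropLeading rest

def trim_blank_edges_alt (lines : List String) : List String :=
  (pvDropLeading ((pvDropLeading lines).reverse)).reverse

-- ===== PRECONDITION & SPEC =====
def Spec_trim_blank_edges (lines : List String) (out : List String) : Prop := out = trim_blank_edges_alt lines
instance (lines : List String) (out : List String) : Decidable (Spec_trim_blank_edges lines out) := by unfold Spec_trim_blank_edges; infer_instance

-- ===== CLAIM (what is proved, stated in full; the proofs are below) =====
def Claim_equal_trim_blank_edges : Prop := ∀ (lines : List String), Dom_trim_blank_edges lines → Spec_trim_blank_edges lines (trim_blank_edges lines)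

-- ===== LEMMAS AND PROOFS =====

theorem pvDropLeading_eq_dropWhile (ls : List String) :
    pvDropLeading ls = ls.dropWhile (fun l => l == "") := by
  induction ls with
  | nil => rfl
  | cons a tl ih =>
    by_cases h : a = "" <;> simp [pvDropLeading, h, ih]

theorem pvTrimStart_eq (ls pre : List String) :
    pvTrimStart (pre ++ ls) (pre ++ ls).length pre.length
      = pre.length + (ls.takeWhile (fun l => l == "")).length := by
  induction ls generalizing pre with
  | nil =>
    rw [pvTrimStart]
    simp
  | cons a tl ih =>
    rw [pvTrimStart]
    by_cases h : a = ""
    · subst h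
      have hget : PySem.List.pyGet? (pre ++ "" :: tl) ((pre.length : Nat) : Int) = some "" :=
        PySem.List.pyGet?_append_length pre tl ""
      have hlt : pre.length < (pre ++ "" :: tl).length := by simp
      rw [dif_pos ⟨hlt, hget⟩]
      have := ih (pre ++ [""])
      simp only [List.append_assoc, List.cons_append, List.nil_append,
        List.length_append, List.length_cons, List.length_nil] at this ⊢
      simpa [List.takeWhile, Nat.add_assoc, Nat.add_comm, Nat.add_left_comm] using this
    · have hget : PySem.List.pyGet? (pre ++ a :: tl) ((pre.length : Nat) : Int) = some a :=
        PySem.List.pyGet?_append_length pre tl a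
      rw [dif_neg]
      · simp [h]
      · rintro ⟨-, hc⟩
        rw [hget] at hc
        exact h (Option.some.inj hc)

theorem pvTrimEnd_eq (ls : List String) : ∀ (suf : List String) (start : Nat),
    start ≤ ls.length →
    pvTrimEnd (ls ++ suf) start ls.length
      = start + ((ls.drop start).reverse.dropWhile (fun l => l == "")).length := by
  induction ls using List.reverseRecOn with
  | nil =>
    intro suf start h
    have h0 : start = 0 := Nat.le_zero.mp h
    subst h0
    rw [pvTrimEnd]
    simp
  | append_singleton init a ih =>
    intro suf start hstart
    simp only [List.length_append, List.length_singleton] at hstart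
    rw [pvTrimEnd]
    by_cases hse : start = init.length + 1
    · subst hse
      rw [dif_neg (by simp)]
      simp [List.drop_eq_nil_of_le]
    · have hlt : start < init.length + 1 := by omega
      have hget : PySem.List.pyGet? (init ++ [a] ++ suf)
          ((((init ++ [a]).length : Nat) : Int) - 1) = some a := by
        have heq : (((init ++ [a]).length : Nat) : Int) - 1 = ((init.length : Nat) : Int) := by
          push_cast [List.length_append, List.length_singleton]; ring
        rw [heq, List.append_assoc, List.singleton_append]
        exact PySem.List.pyGet?_append_length init suf a
      have hdrop : (init ++ [a]).drop start = init.drop start ++ [a] :=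
        List.drop_append_of_le_length (by omega)
      by_cases h : a = ""
      · subst h
        have hlen : (init ++ [""]).length = init.length + 1 := by simp
        rw [dif_pos ⟨by simpa [hlen] using hlt, by simpa [hlen] using hget⟩]
        have hrec : (init ++ [""]).length - 1 = init.length := by simp
        rw [hrec, List.append_assoc, List.singleton_append]
        have := ih ("" :: suf) start (by omega)
        rw [this, hdrop]
        simp
      · rw [dif_neg]
        · rw [hdrop]
          simp [h]
          omega
        · rintro ⟨-, hc⟩
          rw [hget] at hc
          exact h (Option.some.inj hc)

theorem length_takeWhile_le' (p : String → Bool) (ls : List String) :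
    (ls.takeWhile p).length ≤ ls.length := by
  induction ls with
  | nil => simp
  | cons a tl ih =>
    by_cases h : p a <;> simp [h] <;> omega

theorem drop_length_takeWhile (p : String → Bool) (ls : List String) :
    ls.drop (ls.takeWhile p).length = ls.dropWhile p := by
  induction ls with
  | nil => rfl
  | cons a tl ih =>
    by_cases h : p a <;> simp [List.takeWhile, List.dropWhile, h, ih]

-- ===== VERDICT (by name: the statement is the Claim_ definition above) =====
theorem trim_blank_edges_spec : Claim_equal_trim_blank_edges := by
  intro lines _
  unfold Spec_trim_blank_edges trim_blank_edges trim_blank_edges_alt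
  have hs : pvTrimStart lines lines.length 0
      = (lines.takeWhile (fun l => l == "")).length := by
    simpa using pvTrimStart_eq lines []
  set p : String → Bool := fun l => l == "" with hp
  set s : Nat := (lines.takeWhile p).length with hsdef
  have hsle : s ≤ lines.length := by
    rw [hsdef]; exact length_takeWhile_le' p lines
  have he : pvTrimEnd lines s lines.length
      = s + ((lines.drop s).reverse.dropWhile p).length := by
    simpa using pvTrimEnd_eq lines [] s hsle
  simp only [hs, he, PySem.List.slice_natCast]
  have hd : lines.drop s = lines.dropWhile p := drop_length_takeWhile p lines
  rw [Nat.add_sub_cancel_left, hd]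
  set d : List String := lines.dropWhile p with hddef
  have hsplit : d = (d.reverse.dropWhile p).reverse ++ (d.reverse.takeWhile p).reverse := by
    calc d = d.reverse.reverse := (List.reverse_reverse d).symm
      _ = (d.reverse.takeWhile p ++ d.reverse.dropWhile p).reverse := by
            rw [List.takeWhile_append_dropWhile]
      _ = (d.reverse.dropWhile p).reverse ++ (d.reverse.takeWhile p).reverse := by
            rw [List.reverse_append]
  rw [pvDropLeading_eq_dropWhile, pvDropLeading_eq_dropWhile, ← hp, ← hddef]
  conv_lhs => rw [hsplit]
  exact List.take_left' (by simp)
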